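-- pv_equiv track=rewrite | github.com/GJChaitin/unknowable | lisp.py | delimiters
-- ===== SOURCE A (Python) =====
-- def delimiters(string): # add blank space around delimiters so can tokenize at blanks
--    newstring = ""       # returns a new, expanded character string
--    open_comments = 0
--    for i in range(len(string)) :
--        match (string[i]) :             # eliminate [[[nested comments]]]
--           case "["  :
--              newstring += " "          # replace by blank
--              open_comments += 1
--              continue
--           case "]"  :
--              newstring += " "          # replace by blank
--              open_comments -= 1
--              continue
--        if open_comments > 0 :
--           newstring += " "             # replace comment by blanks
--           continue
--        match (string[i]) :             # add blank space around delimiter?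
--           case "'" :
--              newstring += " ' "        # ' delimiter
--           case '"' :
--              newstring += ' " '        # " delimiter
--           case "(" :
--              newstring += " ( "        # ( delimiter
--           case ")" :
--              newstring += " ) "        # ) delimiter
--           case "\n" :
--              newstring += " "          # replace new line character by blank
--           case _ :
--              newstring += string[i]    # retain character, no blank space to add
--    return newstring
-- ===== SOURCE B (Python) =====
-- # Two-pass re-implementation: precompute a depth table, then map each position.
-- def delimiters(string):
--     depth = []
--     d = 0
--     for c in string:
--         depth.append(d)
--         if c == '[':
--             d += 1
--         elif c == ']':
--             d -= 1
--     MAP = {"'": " ' ", '"': ' " ', '(': ' ( ', ')': ' ) ', '\n': ' '}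
--     out = []
--     for c, dd in zip(string, depth):
--         if c == '[' or c == ']':
--             out.append(' ')
--         elif dd > 0:
--             out.append(' ')
--         else:
--             out.append(MAP.get(c, c))
--     return ''.join(out)
-- ===== Notes on version B (the rewrite author's own statement) =====
-- stated objective: alternative
-- what changed: Replaces A's single stateful loop (accumulating output while tracking an open-comment counter) with two passes: a precomputed depth table giving the nesting level before each index, then a stateless per-position map joined at the end.
import Mathlib
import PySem

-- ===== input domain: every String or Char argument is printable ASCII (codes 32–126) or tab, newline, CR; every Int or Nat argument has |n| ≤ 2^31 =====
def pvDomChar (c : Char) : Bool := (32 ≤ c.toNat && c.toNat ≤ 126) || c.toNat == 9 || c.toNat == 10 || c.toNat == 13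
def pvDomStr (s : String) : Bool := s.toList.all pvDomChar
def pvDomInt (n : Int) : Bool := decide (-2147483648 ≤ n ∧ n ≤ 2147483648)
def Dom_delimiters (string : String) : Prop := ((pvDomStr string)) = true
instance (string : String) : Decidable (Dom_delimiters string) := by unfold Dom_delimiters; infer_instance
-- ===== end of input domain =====

-- B is a two-pass re-implementation (depth table + per-position map) of A's single stateful loop; same return value.

-- ===== PORT A =====
-- the per-character expansion of A's second match (outside comments, non-bracket)
def padA (c : Char) : List Char :=
  if c = '\'' then [' ', '\'', ' ']
  else if c = '"' then [' ', '"', ' ']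
  else if c = '(' then [' ', '(', ' ']
  else if c = ')' then [' ', ')', ' ']
  else if c = '\n' then [' ']
  else [c]

-- one iteration of A's loop: state = (newstring, open_comments)
def stepA (st : List Char × Int) (c : Char) : List Char × Int :=
  if c = '[' then (st.1 ++ [' '], st.2 + 1)
  else if c = ']' then (st.1 ++ [' '], st.2 - 1)
  else if st.2 > 0 then (st.1 ++ [' '], st.2)
  else (st.1 ++ padA c, st.2)

def delimiters (string : String) : String :=
  String.mk (string.toList.foldl stepA ([], 0)).1

-- ===== PORT B =====
-- first pass of B: depth[i] = net '[' minus ']' strictly before i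
def depthList (cs : List Char) (d : Int) : List Int :=
  match cs with
  | [] => []
  | c :: rest =>
      d :: depthList rest (if c = '[' then d + 1 else if c = ']' then d - 1 else d)

-- B's MAP.get(c, c)
def mapB (c : Char) : List Char :=
  (PySem.Dict.ofList [('\'', [' ', '\'', ' ']), ('"', [' ', '"', ' ']),
                      ('(', [' ', '(', ' ']), (')', [' ', ')', ' ']),
                      ('\n', [' '])]).getD c [c]

-- second pass of B: emit per (char, depth) pair
def emitB (p : Char × Int) : List Char :=
  if p.1 = '[' ∨ p.1 = ']' then [' ']
  else if p.2 > 0 then [' ']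
  else mapB p.1

def delimiters_alt (string : String) : String :=
  String.mk (((string.toList.zip (depthList string.toList 0)).map emitB).flatten)

-- ===== PRECONDITION & SPEC =====
def Spec_delimiters (string : String) (out : String) : Prop := out = delimiters_alt string
instance (string : String) (out : String) : Decidable (Spec_delimiters string out) := by unfold Spec_delimiters; infer_instance

-- ===== CLAIM (what is proved, stated in full; the proofs are below) =====
def Claim_equal_delimiters : Prop := ∀ (string : String), Dom_delimiters string → Spec_delimiters string (delimiters string)

-- ===== LEMMAS AND PROOFS =====

-- B's MAP.get lookup agrees with A's match-expansion on non-bracket chars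
theorem mapB_eq_padA (c : Char) : mapB c = padA c := by
  by_cases hq : c = '\''
  · subst hq; decide
  by_cases hdq : c = '"'
  · subst hdq; decide
  by_cases hp : c = '('
  · subst hp; decide
  by_cases hcp : c = ')'
  · subst hcp; decide
  by_cases hn : c = '\n'
  · subst hn; decide
  have e1 : ('\'' == c) = false := beq_eq_false_iff_ne.mpr (Ne.symm hq)
  have e2 : ('"' == c) = false := beq_eq_false_iff_ne.mpr (Ne.symm hdq)
  have e3 : ('(' == c) = false := beq_eq_false_iff_ne.mpr (Ne.symm hp)
  have e4 : (')' == c) = false := beq_eq_false_iff_ne.mpr (Ne.symm hcp)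
  have e5 : ('\n' == c) = false := beq_eq_false_iff_ne.mpr (Ne.symm hn)
  have hd : (PySem.Dict.ofList [('\'', [' ', '\'', ' ']), ('"', [' ', '"', ' ']),
      ('(', [' ', '(', ' ']), (')', [' ', ')', ' ']), ('\n', [' '])]).items
      = [('\'', [' ', '\'', ' ']), ('"', [' ', '"', ' ']),
         ('(', [' ', '(', ' ']), (')', [' ', ')', ' ']), ('\n', [' '])] := rfl
  simp [mapB, padA, PySem.Dict.getD, PySem.Dict.get?, hd, List.find?, e1, e2, e3, e4, e5,
    hq, hdq, hp, hcp, hn]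

-- loop invariant: A's fold from (acc, d) appends exactly B's flattened emissions at depths from d
theorem foldl_stepA_eq (cs : List Char) (acc : List Char) (d : Int) :
    (cs.foldl stepA (acc, d)).1 = acc ++ ((cs.zip (depthList cs d)).map emitB).flatten := by
  induction cs generalizing acc d with
  | nil => simp
  | cons c rest ih =>
      simp only [List.foldl, depthList, List.zip_cons_cons, List.map_cons, List.flatten_cons]
      by_cases h1 : c = '['
      · simp [stepA, emitB, h1, ih, List.append_assoc]
      · by_cases h2 : c = ']'
        · simp [stepA, emitB, h2, ih, List.append_assoc]
        · by_cases h3 : d > 0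
          · simp [stepA, emitB, h1, h2, h3, ih, List.append_assoc]
          · have hs : stepA (acc, d) c = (acc ++ padA c, d) := by
              simp [stepA, h1, h2, h3]
            have he : emitB (c, d) = padA c := by
              simp [emitB, h1, h2, h3, mapB_eq_padA]
            rw [hs, ih, he]
            simp [h1, h2, List.append_assoc]

-- ===== VERDICT (by name: the statement is the Claim_ definition above) =====
theorem delimiters_spec : Claim_equal_delimiters := by
  intro s _
  unfold Spec_delimiters delimiters delimiters_alt
  rw [foldl_stepA_eq]
  simp
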